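-- pv_equiv track=rewrite | github.com/AlessioBardelli97/Advent-of-Code | 2025/Day05/src/main.py | part_two
-- ===== SOURCE A (Python) =====
-- def range_overlap(range_1: tuple[int, int], range_2: tuple[int, int]) -> bool:
--   if range_1[1] >= range_2[0]:
--     return True
--   return False
--
-- def merge_range(range_1: tuple[int, int], range_2: tuple[int, int]) -> tuple[int, int]:
--   return min(range_1[0], range_2[0]), max(range_1[1], range_2[1])
--
-- def part_two(fresh_ids_range: list[tuple[int, int]]) -> int:
--   copy_of_fresh_ids_range, i = sorted(fresh_ids_range, key=lambda x: x[0]), 0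
--   while i < len(copy_of_fresh_ids_range) - 1:
--     if range_overlap(copy_of_fresh_ids_range[i], copy_of_fresh_ids_range[i+1]):
--       copy_of_fresh_ids_range[i] = merge_range(copy_of_fresh_ids_range[i], copy_of_fresh_ids_range[i+1])
--       del copy_of_fresh_ids_range[i+1]
--     else:
--       i += 1
--   return sum(fresh_id_range[1] - fresh_id_range[0] + 1 for fresh_id_range in copy_of_fresh_ids_range)
-- ===== SOURCE B (Python) =====
-- def part_two(fresh_ids_range):
--   total, cur = 0, None
--   for r in sorted(fresh_ids_range, key=lambda x: x[0]):
--     if cur is None: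
--       cur = [r[0], r[1]]
--     elif cur[1] >= r[0]:
--       cur = [min(cur[0], r[0]), max(cur[1], r[1])]
--     else:
--       total += cur[1] - cur[0] + 1
--       cur = [r[0], r[1]]
--   if cur is not None:
--     total += cur[1] - cur[0] + 1
--   return total
-- ===== Notes on version B (the rewrite author's own statement) =====
-- stated objective: alternative
-- what changed: Replaces A's index-driven while-loop that merges adjacent ranges by overwriting an entry and deleting its neighbour in place with a single forward pass over the sorted list that carries one current interval and a running total and never materialises the merged list.
import Mathlib
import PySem

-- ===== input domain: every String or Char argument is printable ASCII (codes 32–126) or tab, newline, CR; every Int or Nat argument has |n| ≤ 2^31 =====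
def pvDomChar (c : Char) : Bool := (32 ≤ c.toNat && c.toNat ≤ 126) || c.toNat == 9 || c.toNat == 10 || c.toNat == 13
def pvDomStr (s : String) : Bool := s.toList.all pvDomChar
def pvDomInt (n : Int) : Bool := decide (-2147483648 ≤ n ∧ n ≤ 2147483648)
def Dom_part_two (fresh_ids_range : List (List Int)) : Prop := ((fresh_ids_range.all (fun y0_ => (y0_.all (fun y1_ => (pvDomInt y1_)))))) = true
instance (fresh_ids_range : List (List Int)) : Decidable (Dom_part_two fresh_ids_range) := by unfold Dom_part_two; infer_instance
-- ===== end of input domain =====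

set_option maxRecDepth 4096


-- B replaces A's in-place merge-and-delete while-loop by a single pass over the
-- sorted list with one current interval and a running total (objective: alternative).
-- Equivalence is about the RETURN value; neither program mutates its argument
-- (A copies via sorted()).

-- ===== PORT A =====
-- Python indexing r[0] / r[1] is ported as List.getD; exact whenever the element
-- has length ≥ 2, which Pre_part_two guarantees for the input ranges (merged
-- entries built by the loop always have length 2).

-- the while-loop: state = (current list, index i); merging shortens the list,
-- otherwise i advances
def pyPartTwoLoop (l : List (List Int)) (i : Nat) : List (List Int) :=
  if h : i + 1 < l.length then
    let r1 := l.getD i []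
    let r2 := l.getD (i + 1) []
    if r1.getD 1 0 ≥ r2.getD 0 0 then
      pyPartTwoLoop
        (l.take i ++ [min (r1.getD 0 0) (r2.getD 0 0), max (r1.getD 1 0) (r2.getD 1 0)] :: l.drop (i + 2)) i
    else
      pyPartTwoLoop l (i + 1)
  else l
termination_by l.length - i
decreasing_by
  · simp [List.length_take, List.length_drop]; omega
  · omega

-- sum(r[1] - r[0] + 1 for r in …)
def pySpanSum (l : List (List Int)) : Int :=
  l.foldl (fun acc r => acc + (r.getD 1 0 - r.getD 0 0 + 1)) 0

def part_two (fresh_ids_range : List (List Int)) : Int :=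
  pySpanSum (pyPartTwoLoop (PySem.List.sorted fresh_ids_range (fun x => x.getD 0 0) false) 0)

-- ===== PORT B =====
-- Source B's for-loop after the first element: state = (running total, current interval)
def altMergePass (total : Int) (lo hi : Int) : List (List Int) → Int
  | [] => total + (hi - lo + 1)
  | r :: rest =>
    if hi ≥ r.getD 0 0 then
      altMergePass total (min lo (r.getD 0 0)) (max hi (r.getD 1 0)) rest
    else
      altMergePass (total + (hi - lo + 1)) (r.getD 0 0) (r.getD 1 0) rest

def part_two_alt (fresh_ids_range : List (List Int)) : Int :=
  match PySem.List.sorted fresh_ids_range (fun x => x.getD 0 0) false with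
  | [] => 0
  | r :: rest => altMergePass 0 (r.getD 0 0) (r.getD 1 0) rest

-- ===== PRECONDITION & SPEC =====
-- Pre_ excludes inputs containing a range with fewer than two components: there
-- the Python A raises IndexError on r[0]/r[1] (and B raises likewise).
def Pre_part_two (fresh_ids_range : List (List Int)) : Prop :=
  ∀ r ∈ fresh_ids_range, 2 ≤ r.length
instance (fresh_ids_range : List (List Int)) : Decidable (Pre_part_two fresh_ids_range) := by
  unfold Pre_part_two; infer_instance

def pvWitness_part_two : List (List Int) := [[7, 9], [1, 3], [2, 5]]

def Spec_part_two (fresh_ids_range : List (List Int)) (out : Int) : Prop := out = part_two_alt fresh_ids_range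
instance (fresh_ids_range : List (List Int)) (out : Int) : Decidable (Spec_part_two fresh_ids_range out) := by unfold Spec_part_two; infer_instance

-- ===== CLAIM (what is proved, stated in full; the proofs are below) =====
def Claim_equal_part_two : Prop := ∀ (fresh_ids_range : List (List Int)), Dom_part_two fresh_ids_range → Pre_part_two fresh_ids_range → Spec_part_two fresh_ids_range (part_two fresh_ids_range)

-- ===== LEMMAS AND PROOFS =====

-- functional description of A's loop: merge the first two entries while they
-- overlap, else emit the head and continue
def mergeAll : List (List Int) → List (List Int)
  | [] => []
  | [r] => [r]
  | r1 :: r2 :: rest =>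
    if r1.getD 1 0 ≥ r2.getD 0 0 then
      mergeAll ([min (r1.getD 0 0) (r2.getD 0 0), max (r1.getD 1 0) (r2.getD 1 0)] :: rest)
    else r1 :: mergeAll (r2 :: rest)
termination_by l => l.length

theorem pySpanSum_eq_sum (l : List (List Int)) :
    pySpanSum l = (l.map (fun r => r.getD 1 0 - r.getD 0 0 + 1)).sum := by
  unfold pySpanSum
  rw [PySem.List.foldl_add]
  omega

theorem pySpanSum_cons (r : List Int) (l : List (List Int)) :
    pySpanSum (r :: l) = (r.getD 1 0 - r.getD 0 0 + 1) + pySpanSum l := by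
  simp [pySpanSum_eq_sum]

theorem mergeAll_cc_pos (r1 r2 : List Int) (rest : List (List Int))
    (h : r1.getD 1 0 ≥ r2.getD 0 0) :
    mergeAll (r1 :: r2 :: rest)
      = mergeAll ([min (r1.getD 0 0) (r2.getD 0 0), max (r1.getD 1 0) (r2.getD 1 0)] :: rest) := by
  rw [mergeAll, if_pos h]

theorem mergeAll_cc_neg (r1 r2 : List Int) (rest : List (List Int))
    (h : ¬ r1.getD 1 0 ≥ r2.getD 0 0) :
    mergeAll (r1 :: r2 :: rest) = r1 :: mergeAll (r2 :: rest) := by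
  rw [mergeAll, if_neg h]

theorem pyPartTwoLoop_eq (l : List (List Int)) (i : Nat) :
    pyPartTwoLoop l i = l.take i ++ mergeAll (l.drop i) := by
  fun_induction pyPartTwoLoop l i with
  | case1 l i h r1 r2 hov ih =>
    have hlen : (l.take i).length = i := by simp; omega
    have hd : l.drop i = r1 :: r2 :: l.drop (i + 2) := by
      have h1 : l.drop i = l[i] :: l.drop (i + 1) := List.drop_eq_getElem_cons (by omega)
      have h2 : l.drop (i + 1) = l[i + 1] :: l.drop (i + 2) := List.drop_eq_getElem_cons (by omega)
      rw [h1, h2]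
      rw [show r1 = l[i] from by
            simp [r1, List.getD_eq_getElem?_getD,
              List.getElem?_eq_getElem (show i < l.length by omega)],
          show r2 = l[i + 1] from by
            simp [r2, List.getD_eq_getElem?_getD,
              List.getElem?_eq_getElem (show i + 1 < l.length by omega)]]
    rw [ih, hd, mergeAll_cc_pos _ _ _ hov,
        List.take_left' hlen, List.drop_left' hlen]
  | case2 l i h r1 r2 hov ih =>
    have hd : l.drop i = r1 :: l.drop (i + 1) := by
      have h1 : l.drop i = l[i] :: l.drop (i + 1) := List.drop_eq_getElem_cons (by omega)
      rw [h1,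
          show r1 = l[i] from by
            simp [r1, List.getD_eq_getElem?_getD,
              List.getElem?_eq_getElem (show i < l.length by omega)]]
    have hd2 : l.drop (i + 1) = l[i + 1] :: l.drop (i + 2) := List.drop_eq_getElem_cons (by omega)
    have hov' : ¬ r1.getD 1 0 ≥ (l[i + 1]).getD 0 0 := by
      have : r2 = l[i + 1] := by
        simp [r2, List.getD_eq_getElem?_getD,
          List.getElem?_eq_getElem (show i + 1 < l.length by omega)]
      rw [← this]; exact hov
    rw [ih, hd, hd2, mergeAll_cc_neg _ _ _ hov', ← hd2,
        show r1 = l[i] from by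
          simp [r1, List.getD_eq_getElem?_getD,
            List.getElem?_eq_getElem (show i < l.length by omega)],
        List.take_succ_eq_append_getElem (show i < l.length by omega),
        List.append_assoc, List.singleton_append]
  | case3 l i h =>
    have : l.drop i = [] ∨ ∃ r, l.drop i = [r] := by
      rcases hdi : l.drop i with _ | ⟨r, rest⟩
      · exact Or.inl rfl
      · refine Or.inr ⟨r, ?_⟩
        have hle : (l.drop i).length ≤ 1 := by simp; omega
        rw [hdi] at hle; simp at hle
        simp [hle]
    rcases this with hd | ⟨r, hd⟩ <;>
      · rw [hd, mergeAll, ← hd, List.take_append_drop]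

-- the head list enters mergeAll / pySpanSum only through its first two components
theorem mergeAll_head_norm (r : List Int) (rest : List (List Int)) :
    pySpanSum (mergeAll (r :: rest))
      = pySpanSum (mergeAll ([r.getD 0 0, r.getD 1 0] :: rest)) := by
  rcases rest with _ | ⟨r2, rest'⟩
  · simp [mergeAll, pySpanSum]
  · have e0 : ([r.getD 0 0, r.getD 1 0] : List Int).getD 0 0 = r.getD 0 0 := rfl
    have e1 : ([r.getD 0 0, r.getD 1 0] : List Int).getD 1 0 = r.getD 1 0 := rfl
    by_cases hov : r.getD 1 0 ≥ r2.getD 0 0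
    · rw [mergeAll_cc_pos _ _ _ hov, mergeAll_cc_pos _ _ _ (by rw [e1]; exact hov), e0, e1]
    · rw [mergeAll_cc_neg _ _ _ hov, mergeAll_cc_neg _ _ _ (by rw [e1]; exact hov),
          pySpanSum_cons, pySpanSum_cons, e0, e1]

theorem altMergePass_eq (rest : List (List Int)) :
    ∀ (total lo hi : Int),
      altMergePass total lo hi rest = total + pySpanSum (mergeAll ([lo, hi] :: rest)) := by
  induction rest with
  | nil => intro total lo hi; simp [altMergePass, mergeAll, pySpanSum]
  | cons r rest' ih =>
    intro total lo hi
    have e0 : ([lo, hi] : List Int).getD 0 0 = lo := rfl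
    have e1 : ([lo, hi] : List Int).getD 1 0 = hi := rfl
    rw [altMergePass]
    by_cases hov : hi ≥ r.getD 0 0
    · rw [if_pos hov, ih, mergeAll_cc_pos _ _ _ (by rw [e1]; exact hov), e0, e1]
    · rw [if_neg hov, ih, mergeAll_cc_neg _ _ _ (by rw [e1]; exact hov),
          pySpanSum_cons, e0, e1, ← mergeAll_head_norm]
      ring

-- ===== VERDICT (by name: the statement is the Claim_ definition above) =====
theorem part_two_spec : Claim_equal_part_two := by
  intro l _ _
  unfold Spec_part_two part_two part_two_alt
  rw [pyPartTwoLoop_eq]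
  rcases hs : PySem.List.sorted l (fun x => x.getD 0 0) false with _ | ⟨r, rest⟩
  · simp [mergeAll, pySpanSum]
  · show pySpanSum (List.take 0 (r :: rest) ++ mergeAll (List.drop 0 (r :: rest)))
        = altMergePass 0 (r.getD 0 0) (r.getD 1 0) rest
    rw [altMergePass_eq]
    simp only [List.take_zero, List.drop_zero, List.nil_append, zero_add]
    exact mergeAll_head_norm r rest
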